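-- pv_equiv track=rewrite | github.com/AntonBjornNilsson/aoc | 2023/11/a.py | prep
-- ===== SOURCE A (Python) =====
-- from typing import List
--
-- def prep(example: List[str]) -> List[str]:
--
--     rows_i = []
--     cols_i = []
--     for i, line in enumerate(example):
--         if line == '.' * len(line):
--             rows_i.append(i)
--     for col in range(len(example[0])):
--         cols = [example[x][col] for x in range(len(example))]
--         if cols == ["."] * len(cols):
--             cols_i.append(col)
--
--     extendo = 1
--     new_ex = []
--     for x in range(len(example)):
--         new_ex.append([])
--         for y in range(len(example[0])):
--             new_ex[x].append((x,y))
--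
--     for r in rows_i:
--         for row in range(r, len(example)):
--             new_ex[row] = [(x[0]+extendo, x[1]) for i, x in enumerate(new_ex[row])]
--
--     for r in cols_i:
--         for row in range(len(example)):
--             new_ex[row] = [(x[0], x[1]) if i <= r else (x[0], x[1] + extendo)  for i, x in enumerate(new_ex[row])]
--
--
--     return new_ex
-- ===== SOURCE B (Python) =====
-- from typing import List
--
-- def prep(example: List[str]) -> List[str]:
--     n = len(example)
--     m = len(example[0])
--     # inclusive prefix counts of all-dot rows: row_off[x] = # empty rows r with r <= x
--     row_off = []
--     acc = 0
--     for line in example: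
--         if all(ch == '.' for ch in line):
--             acc += 1
--         row_off.append(acc)
--     # exclusive prefix counts of all-dot columns: col_off[y] = # empty cols c with c < y
--     col_off = []
--     acc = 0
--     for y in range(m):
--         col_off.append(acc)
--         if all(example[x][y] == '.' for x in range(n)):
--             acc += 1
--     return [[(x + row_off[x], y + col_off[y]) for y in range(m)] for x in range(n)]
-- ===== Notes on version B (the rewrite author's own statement) =====
-- stated objective: alternative
-- what changed: A rewrites the whole coordinate grid once per empty row and once per empty column; B computes two prefix-count arrays of empty rows/columns in one pass each and writes every cell once with its offsets (fewer asymptotic grid passes, but not measured faster on the generated inputs).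
import Mathlib
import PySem

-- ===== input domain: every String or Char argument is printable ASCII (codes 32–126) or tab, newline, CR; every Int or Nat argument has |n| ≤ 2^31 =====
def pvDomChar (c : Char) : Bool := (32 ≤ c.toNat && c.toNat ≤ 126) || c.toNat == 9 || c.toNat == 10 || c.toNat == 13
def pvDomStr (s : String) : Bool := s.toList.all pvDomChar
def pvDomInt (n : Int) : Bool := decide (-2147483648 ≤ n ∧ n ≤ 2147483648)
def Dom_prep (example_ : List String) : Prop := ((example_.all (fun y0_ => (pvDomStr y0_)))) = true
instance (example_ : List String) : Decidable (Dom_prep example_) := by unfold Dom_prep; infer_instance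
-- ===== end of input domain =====

-- B replaces A's repeated whole-grid rewrites (one pass over the grid per empty row/column)
-- by two prefix-count arrays applied to each cell once; objective: alternative algorithm.

-- ===== PORT A =====
-- line == '.' * len(line)
def pvAllDots (s : String) : Bool := s.toList == List.replicate s.toList.length '.'

-- example[x][col]; indices are in range under Pre_prep (the defaults are never read there)
def pvCharAt (example_ : List String) (x col : Nat) : Char := (example_.getD x "").toList.getD col '?'

-- cols == ["."] * len(cols)
def pvColDots (example_ : List String) (col : Nat) : Bool :=
  let cols := (List.range example_.length).map (fun x => pvCharAt example_ x col)
  cols == List.replicate cols.length '.'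

def prep (example_ : List String) : List (List (Int × Int)) :=
  let n := example_.length
  let m := (example_.getD 0 "").toList.length
  let rows_i : List Nat :=
    (List.range n).foldl (fun acc i => if pvAllDots (example_.getD i "") then acc ++ [i] else acc) []
  let cols_i : List Nat :=
    (List.range m).foldl (fun acc col => if pvColDots example_ col then acc ++ [col] else acc) []
  let extendo : Int := 1
  let new_ex : List (List (Int × Int)) :=
    (List.range n).map (fun x => (List.range m).map (fun y => (Int.ofNat x, Int.ofNat y)))
  let new_ex := rows_i.foldl (fun g r =>
    (List.range' r (n - r)).foldl
      (fun g row => g.set row ((g.getD row []).map (fun p => (p.1 + extendo, p.2)))) g) new_ex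
  let new_ex := cols_i.foldl (fun g r =>
    (List.range n).foldl
      (fun g row => g.set row ((g.getD row []).mapIdx
        (fun i p => if i ≤ r then (p.1, p.2) else (p.1, p.2 + extendo)))) g) new_ex
  new_ex

-- ===== PORT B =====
def prep_alt (example_ : List String) : List (List (Int × Int)) :=
  let n := example_.length
  let m := (example_.getD 0 "").toList.length
  -- inclusive prefix counts of all-dot rows
  let rowOff : List Int :=
    (example_.foldl (fun (p : Int × List Int) line =>
      let acc := if line.toList.all (fun ch => ch == '.') then p.1 + 1 else p.1
      (acc, p.2 ++ [acc])) (0, [])).2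
  -- exclusive prefix counts of all-dot columns
  let colOff : List Int :=
    ((List.range m).foldl (fun (p : Int × List Int) y =>
      let out := p.2 ++ [p.1]
      let acc := if (List.range n).all (fun x => (example_.getD x "").toList.getD y '?' == '.') then p.1 + 1 else p.1
      (acc, out)) (0, [])).2
  (List.range n).map (fun x => (List.range m).map (fun y =>
    ((↑x + rowOff.getD x 0, ↑y + colOff.getD y 0) : Int × Int)))

-- ===== PRECONDITION & SPEC =====
-- Pre_ excludes exactly the inputs on which the Python A raises an IndexError: the empty
-- list (example[0]) and grids in which some line is shorter than line 0 (example[x][col]).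
def Pre_prep (example_ : List String) : Prop :=
  example_ ≠ [] ∧ ∀ line ∈ example_, (example_.getD 0 "").toList.length ≤ line.toList.length
instance (example_ : List String) : Decidable (Pre_prep example_) := by unfold Pre_prep; infer_instance
def pvWitness_prep : List String := ["#..", "...", ".#."]
def Spec_prep (example_ : List String) (out : List (List (Int × Int))) : Prop := out = prep_alt example_
instance (example_ : List String) (out : List (List (Int × Int))) : Decidable (Spec_prep example_ out) := by unfold Spec_prep; infer_instance

-- ===== CLAIM (what is proved, stated in full; the proofs are below) =====
def Claim_equal_prep : Prop := ∀ (example_ : List String), Dom_prep example_ → Pre_prep example_ → Spec_prep example_ (prep example_)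

-- ===== LEMMAS AND PROOFS =====

-- the common closed form both programs are reduced to
def pvGrid (n m : Nat) (a b : Nat → Int) : List (List (Int × Int)) :=
  (List.range n).map (fun x => (List.range m).map (fun y => ((↑x + a x, ↑y + b y) : Int × Int)))

lemma pv_grid_congr (n m : Nat) (a a' b b' : Nat → Int)
    (ha : ∀ x, x < n → a x = a' x) (hb : ∀ y, y < m → b y = b' y) :
    pvGrid n m a b = pvGrid n m a' b' := by
  unfold pvGrid
  refine List.map_congr_left (fun x hx => ?_)
  refine List.map_congr_left (fun y hy => ?_)
  rw [ha x (List.mem_range.mp hx), hb y (List.mem_range.mp hy)]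

lemma pv_set_map_range {α : Type} (n r : Nat) (ψ : Nat → α) (v : α) (hr : r < n) :
    ((List.range n).map ψ).set r v = (List.range n).map (fun x => if x = r then v else ψ x) := by
  refine List.ext_getElem (by simp) (fun i h1 h2 => ?_)
  simp only [List.getElem_set, List.getElem_map, List.getElem_range]
  by_cases h : i = r
  · simp [h]
  · simp [h, Ne.symm h]

-- one pass of 'for row in L: g[row] = f(g[row])' over distinct in-range indices
lemma pv_foldl_set {α : Type} (n : Nat) (d : α) (f : α → α) :
    ∀ (L : List Nat) (ψ : Nat → α), L.Nodup → (∀ i ∈ L, i < n) →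
      L.foldl (fun g row => g.set row (f (g.getD row d))) ((List.range n).map ψ)
        = (List.range n).map (fun x => if x ∈ L then f (ψ x) else ψ x)
  | [], ψ, _, _ => by simp
  | r :: L, ψ, hnd, hlt => by
    have hr : r < n := hlt r List.mem_cons_self
    have hrL : r ∉ L := (List.nodup_cons.mp hnd).1
    rw [List.foldl_cons, PySem.List.getD_map_range ψ n r d hr, pv_set_map_range n r ψ _ hr,
      pv_foldl_set n d f L _ (List.nodup_cons.mp hnd).2
        (fun i hi => hlt i (List.mem_cons_of_mem _ hi))]
    refine List.map_congr_left (fun x hx => ?_)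
    by_cases hxL : x ∈ L
    · have hxr : x ≠ r := fun h => hrL (h ▸ hxL)
      simp [hxL, hxr, List.mem_cons]
    · by_cases hxr : x = r
      · subst hxr; simp [hrL]
      · simp [hxL, hxr, List.mem_cons]

lemma pv_rows_step (n m : Nat) (a b : Nat → Int) (r : Nat) (hr : r ≤ n) :
    (List.range' r (n - r)).foldl
        (fun g row => g.set row ((g.getD row []).map (fun p => (p.1 + 1, p.2)))) (pvGrid n m a b)
      = pvGrid n m (fun x => a x + if r ≤ x then 1 else 0) b := by
  unfold pvGrid
  rw [pv_foldl_set n [] _ (List.range' r (n - r)) _ List.nodup_range'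
    (fun i hi => by have := List.mem_range'_1.mp hi; omega)]
  refine List.map_congr_left (fun x hx => ?_)
  have hx' : x < n := List.mem_range.mp hx
  by_cases hrx : r ≤ x
  · have hmem : x ∈ List.range' r (n - r) := List.mem_range'_1.mpr ⟨hrx, by omega⟩
    simp only [hmem, if_pos, hrx, List.map_map]
    refine List.map_congr_left (fun y _ => ?_)
    simp [add_assoc]
  · have hmem : x ∉ List.range' r (n - r) := fun h => hrx (List.mem_range'_1.mp h).1
    simp [hmem, hrx]

lemma pv_rows_fold (n m : Nat) (b : Nat → Int) :
    ∀ (L : List Nat) (a : Nat → Int), (∀ r ∈ L, r < n) →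
      L.foldl (fun g r =>
          (List.range' r (n - r)).foldl
            (fun g row => g.set row ((g.getD row []).map (fun p => (p.1 + 1, p.2)))) g)
          (pvGrid n m a b)
        = pvGrid n m (fun x => a x + (L.countP (fun r => decide (r ≤ x)) : Int)) b
  | [], a, _ => by simp
  | r :: L, a, hlt => by
    rw [List.foldl_cons, pv_rows_step n m a b r (le_of_lt (hlt r List.mem_cons_self)),
      pv_rows_fold n m b L _ (fun i hi => hlt i (List.mem_cons_of_mem _ hi))]
    refine pv_grid_congr n m _ _ _ _ (fun x _ => ?_) (fun _ _ => rfl)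
    simp only [List.countP_cons]
    by_cases hrx : r ≤ x <;> simp [hrx] <;> push_cast <;> ring

lemma pv_mapIdx_map_range {α β : Type} (m : Nat) (h : Nat → α) (F : Nat → α → β) :
    ((List.range m).map h).mapIdx F = (List.range m).map (fun y => F y (h y)) := by
  refine List.ext_getElem (by simp) (fun i h1 h2 => ?_)
  simp [List.getElem_mapIdx]

lemma pv_cols_step (n m : Nat) (a b : Nat → Int) (r : Nat) :
    (List.range n).foldl
        (fun g row => g.set row ((g.getD row []).mapIdx
          (fun i p => if i ≤ r then (p.1, p.2) else (p.1, p.2 + 1)))) (pvGrid n m a b)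
      = pvGrid n m a (fun y => b y + if r < y then 1 else 0) := by
  unfold pvGrid
  rw [pv_foldl_set n [] _ (List.range n) _ List.nodup_range (fun i hi => List.mem_range.mp hi)]
  refine List.map_congr_left (fun x hx => ?_)
  simp only [hx, if_pos]
  rw [pv_mapIdx_map_range]
  refine List.map_congr_left (fun y _ => ?_)
  by_cases hyr : y ≤ r
  · have h1 : ¬ r < y := by omega
    simp [hyr, h1]
  · have h1 : r < y := by omega
    simp [hyr, h1, add_assoc]

lemma pv_cols_fold (n m : Nat) (a : Nat → Int) :
    ∀ (L : List Nat) (b : Nat → Int),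
      L.foldl (fun g r =>
          (List.range n).foldl
            (fun g row => g.set row ((g.getD row []).mapIdx
              (fun i p => if i ≤ r then (p.1, p.2) else (p.1, p.2 + 1)))) g)
          (pvGrid n m a b)
        = pvGrid n m a (fun y => b y + (L.countP (fun c => decide (c < y)) : Int))
  | [], b => by simp
  | r :: L, b => by
    rw [List.foldl_cons, pv_cols_step n m a b r, pv_cols_fold n m a L _]
    refine pv_grid_congr n m _ _ _ _ (fun _ _ => rfl) (fun y _ => ?_)
    simp only [List.countP_cons]
    by_cases hry : r < y <;> simp [hry] <;> push_cast <;> ring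

-- counting lemmas shared by the two reductions
lemma pv_countP_range_lt (q : Nat → Bool) (k n : Nat) (h : k ≤ n) :
    (List.range n).countP (fun i => q i && decide (i < k)) = (List.range k).countP q := by
  rw [show n = k + (n - k) by omega, List.range_add, List.countP_append, List.countP_map]
  have h1 : (List.range k).countP (fun i => q i && decide (i < k)) = (List.range k).countP q :=
    List.countP_congr (fun i hi => by simp [List.mem_range.mp hi])
  have h2 : (List.range (n - k)).countP ((fun i => q i && decide (i < k)) ∘ (fun x => k + x)) = 0 := by
    rw [List.countP_eq_zero]
    intro i _
    simp
  rw [h1, h2]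
  omega

lemma pv_countP_take {α : Type} (p : α → Bool) (d : α) :
    ∀ (l : List α) (k : Nat), k ≤ l.length →
      (l.take k).countP p = (List.range k).countP (fun i => p (l.getD i d))
  | _, 0, _ => by simp
  | [], k + 1, h => by simp at h
  | a :: l, k + 1, h => by
    rw [List.take_succ_cons, List.countP_cons, List.range_succ_eq_map, List.countP_cons,
      List.countP_map, pv_countP_take p d l k (by simpa using h)]
    congr 1

-- B's running-total loops, characterised
lemma pv_prefix_incl {α : Type} (p : α → Bool) :
    ∀ (l : List α) (c : Int) (out : List Int),
      (l.foldl (fun (s : Int × List Int) line =>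
          let acc := if p line then s.1 + 1 else s.1
          (acc, s.2 ++ [acc])) (c, out)).2
        = out ++ (List.range l.length).map (fun k => c + ((l.take (k + 1)).countP p : Int))
  | [], c, out => by simp
  | a :: l, c, out => by
    rw [List.foldl_cons]
    simp only
    rw [pv_prefix_incl p l _ _, List.length_cons, List.range_succ_eq_map, List.map_cons,
      List.map_map, List.append_assoc, List.singleton_append]
    congr 1
    simp only [List.cons.injEq]
    refine ⟨?_, ?_⟩
    · cases hpa : p a <;> simp [hpa, List.take_succ_cons, List.countP_cons]
    · simp only [List.map_inj_left, Function.comp, Nat.succ_eq_add_one]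
      intro k hk
      rw [List.take_succ_cons, List.countP_cons]
      cases hpa : p a <;> simp [hpa] <;> push_cast <;> ring

lemma pv_prefix_excl {α : Type} (q : α → Bool) :
    ∀ (l : List α) (c : Int) (out : List Int),
      (l.foldl (fun (s : Int × List Int) y =>
          let o := s.2 ++ [s.1]
          let acc := if q y then s.1 + 1 else s.1
          (acc, o)) (c, out)).2
        = out ++ (List.range l.length).map (fun k => c + ((l.take k).countP q : Int))
  | [], c, out => by simp
  | a :: l, c, out => by
    rw [List.foldl_cons]
    simp only
    rw [pv_prefix_excl q l _ _, List.length_cons, List.range_succ_eq_map, List.map_cons,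
      List.map_map, List.append_assoc, List.singleton_append]
    congr 1
    simp only [List.cons.injEq]
    refine ⟨?_, ?_⟩
    · simp
    · simp only [List.map_inj_left, Function.comp, Nat.succ_eq_add_one]
      intro k hk
      rw [List.take_succ_cons, List.countP_cons]
      cases hpa : q a <;> simp [hpa] <;> push_cast <;> ring

-- the predicates of the two programs agree
lemma pv_beq_replicate {α : Type} [DecidableEq α] (l : List α) (c : α) :
    (l == List.replicate l.length c) = l.all (fun x => x == c) := by
  refine Bool.eq_iff_iff.mpr ?_
  simp [List.eq_replicate_iff, List.all_eq_true]

lemma pv_rowPred_eq (s : String) : pvAllDots s = s.toList.all (fun ch => ch == '.') := by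
  rw [pvAllDots, pv_beq_replicate]

lemma pv_colPred_eq (e : List String) (col : Nat) :
    pvColDots e col = (List.range e.length).all (fun x => (e.getD x "").toList.getD col '?' == '.') := by
  simp only [pvColDots, pv_beq_replicate, List.all_map]
  rfl

-- A reduced to the closed form
lemma pv_prep_eq (e : List String) :
    prep e = pvGrid e.length (e.getD 0 "").toList.length
      (fun x => ((((List.range e.length).filter (fun i => pvAllDots (e.getD i ""))).countP
        (fun r => decide (r ≤ x)) : Nat) : Int))
      (fun y => ((((List.range (e.getD 0 "").toList.length).filter (fun col => pvColDots e col)).countP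
        (fun c => decide (c < y)) : Nat) : Int)) := by
  simp only [prep, PySem.List.foldl_append_if, List.nil_append, List.map_id, List.map_id', List.map_id_fun]
  have hinit : (List.range e.length).map
      (fun x => (List.range (e.getD 0 "").toList.length).map (fun y => (Int.ofNat x, Int.ofNat y)))
      = pvGrid e.length (e.getD 0 "").toList.length (fun _ => 0) (fun _ => 0) := by
    unfold pvGrid
    refine List.map_congr_left (fun x _ => ?_)
    refine List.map_congr_left (fun y _ => ?_)
    simp
  rw [hinit,
    pv_rows_fold e.length (e.getD 0 "").toList.length _ _ _
      (fun r hr => List.mem_range.mp (List.mem_of_mem_filter hr)),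
    pv_cols_fold e.length (e.getD 0 "").toList.length _ _ _]
  exact pv_grid_congr _ _ _ _ _ _ (fun x _ => by simp) (fun y _ => by simp)

-- B reduced to the closed form
lemma pv_prep_alt_eq (e : List String) :
    prep_alt e = pvGrid e.length (e.getD 0 "").toList.length
      (fun x => ((List.range e.length).map
        (fun k => (0 : Int) + ((e.take (k + 1)).countP (fun line => line.toList.all (fun ch => ch == '.')) : Int))).getD x 0)
      (fun y => ((List.range (e.getD 0 "").toList.length).map
        (fun k => (0 : Int) + (((List.range (e.getD 0 "").toList.length).take k).countP
          (fun y' => (List.range e.length).all (fun x => (e.getD x "").toList.getD y' '?' == '.')) : Int))).getD y 0) := by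
  simp only [prep_alt, pv_prefix_incl, pv_prefix_excl, List.nil_append, List.length_range]
  rfl

-- ===== VERDICT (by name: the statement is the Claim_ definition above) =====
theorem prep_spec : Claim_equal_prep := by
  intro e _ _
  unfold Spec_prep
  rw [pv_prep_eq, pv_prep_alt_eq]
  refine pv_grid_congr _ _ _ _ _ _ (fun x hx => ?_) (fun y hy => ?_)
  · rw [List.countP_filter, PySem.List.getD_map_range _ _ _ _ hx, zero_add,
      pv_countP_take (fun line => line.toList.all (fun ch => ch == '.')) "" e (x + 1) (by omega)]
    congr 1
    rw [← pv_countP_range_lt (fun i => (e.getD i "").toList.all (fun ch => ch == '.')) (x + 1)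
      e.length (by omega)]
    refine List.countP_congr (fun i _ => ?_)
    simp [pv_rowPred_eq, Nat.lt_succ_iff, Bool.and_comm]
  · rw [List.countP_filter, PySem.List.getD_map_range _ _ _ _ hy, zero_add, List.take_range]
    congr 1
    rw [Nat.min_eq_left (le_of_lt hy),
      ← pv_countP_range_lt
        (fun y' => (List.range e.length).all (fun x => (e.getD x "").toList.getD y' '?' == '.'))
        y _ (le_of_lt hy)]
    refine List.countP_congr (fun c _ => ?_)
    simp [pv_colPred_eq, Bool.and_comm]
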